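-- pv_equiv track=rewrite | github.com/wayofdev/gh-actions-terragrunt | image/src/github_pr_comment/__main__.py | format_plan_text
-- ===== SOURCE A (Python) =====
-- from typing import (NewType, Optional, cast, Tuple, List)
--
-- def format_plan_text(plan_text: str) -> Tuple[str, str]:
--     """
--     Format the given plan for insertion into a PR comment
--     """
--
--     max_body_size = 50000  # bytes
--
--     def truncate(t):
--         lines = []
--         total_size = 0
--
--         for line in t.splitlines():
--             line_size = len(line.encode()) + 1  # + newline
--             if total_size + line_size > max_body_size:
--                 lines.append('Plan is too large to fit in a PR comment. See the full plan in the workflow log.')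
--                 break
--
--             lines.append(line)
--             total_size += line_size
--
--         return '\n'.join(lines)
--
--     if len(plan_text.encode()) > max_body_size:
--         # needs truncation
--         return 'trunc', truncate(plan_text)
--     else:
--         return 'text', plan_text
-- ===== SOURCE B (Python) =====
-- def format_plan_text(plan_text):
--     """
--     Format the given plan for insertion into a PR comment
--     """
--     max_body_size = 50000  # bytes
--
--     if len(plan_text.encode()) <= max_body_size:
--         return 'text', plan_text
--
--     # needs truncation: prefix table of cumulative byte sizes, then slice
--     lines = plan_text.splitlines()
--     cum = []
--     s = 0
--     for line in lines:
--         s += len(line.encode()) + 1  # + newline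
--         cum.append(s)
--     cut = next((i for i, c in enumerate(cum) if c > max_body_size), None)
--     if cut is None:
--         return 'trunc', '\n'.join(lines)
--     return 'trunc', '\n'.join(
--         lines[:cut]
--         + ['Plan is too large to fit in a PR comment. See the full plan in the workflow log.'])
-- ===== Notes on version B (the rewrite author's own statement) =====
-- stated objective: alternative
-- what changed: Replaces A's accumulate-and-break loop that appends kept lines one by one with a prefix table of cumulative line sizes followed by a first-overflow-index search and a slice of the line list.
import Mathlib
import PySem

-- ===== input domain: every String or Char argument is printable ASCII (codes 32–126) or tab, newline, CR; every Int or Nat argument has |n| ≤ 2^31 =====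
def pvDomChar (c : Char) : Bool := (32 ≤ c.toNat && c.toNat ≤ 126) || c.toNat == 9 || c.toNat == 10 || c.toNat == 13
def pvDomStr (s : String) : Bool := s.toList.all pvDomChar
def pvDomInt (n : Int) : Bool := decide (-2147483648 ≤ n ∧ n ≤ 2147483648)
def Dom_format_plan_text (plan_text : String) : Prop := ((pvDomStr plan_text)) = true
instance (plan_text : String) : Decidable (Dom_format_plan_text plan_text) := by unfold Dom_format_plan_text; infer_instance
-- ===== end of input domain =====

-- B replaces A's accumulate-and-break loop with a prefix table of cumulative line sizes,
-- a first-overflow-index search and a slice (alternative decomposition, same cost).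


def pvMsg : String := "Plan is too large to fit in a PR comment. See the full plan in the workflow log."

-- ===== PORT A =====
-- A's inner `truncate` loop: state = (remaining lines, lines built so far, total_size).
-- len(line.encode()) is ported as PySem.Str.len: exact on Dom (ASCII ⇒ one byte per char).
def fptLoop : List String → List String → Int → List String
  | [], lines, _ => lines
  | l :: rest, lines, total =>
    let sz := PySem.Str.len l + 1
    if total + sz > 50000 then lines ++ [pvMsg]
    else fptLoop rest (lines ++ [l]) (total + sz)

def format_plan_text (plan_text : String) : String × String :=
  if PySem.Str.len plan_text > 50000 then
    ("trunc", PySem.Str.join "\n" (fptLoop (PySem.Str.splitlines plan_text) [] 0))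
  else
    ("text", plan_text)

-- ===== PORT B =====
-- B's prefix-table loop: cum = running cumulative sizes (s accumulates through).
def pvCum : List String → Int → List Int
  | [], _ => []
  | l :: rest, s =>
    let s' := s + (PySem.Str.len l + 1)
    s' :: pvCum rest s'

def format_plan_text_alt (plan_text : String) : String × String :=
  if PySem.Str.len plan_text ≤ 50000 then
    ("text", plan_text)
  else
    let lines := PySem.Str.splitlines plan_text
    match (pvCum lines 0).findIdx? (fun c => decide (c > 50000)) with
    | none => ("trunc", PySem.Str.join "\n" lines)
    | some cut => ("trunc", PySem.Str.join "\n" (lines.take cut ++ [pvMsg]))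

-- ===== PRECONDITION & SPEC =====
def Spec_format_plan_text (plan_text : String) (out : String × String) : Prop := out = format_plan_text_alt plan_text
instance (plan_text : String) (out : String × String) : Decidable (Spec_format_plan_text plan_text out) := by unfold Spec_format_plan_text; infer_instance

-- ===== CLAIM (what is proved, stated in full; the proofs are below) =====
def Claim_equal_format_plan_text : Prop := ∀ (plan_text : String), Dom_format_plan_text plan_text → Spec_format_plan_text plan_text (format_plan_text plan_text)

-- ===== LEMMAS AND PROOFS =====

-- common recursive description of the truncated line list, starting at running size t
def pvTail : List String → Int → List String
  | [], _ => []
  | l :: rest, t =>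
    let sz := PySem.Str.len l + 1
    if t + sz > 50000 then [pvMsg] else l :: pvTail rest (t + sz)

theorem fptLoop_eq (ls : List String) : ∀ (acc : List String) (t : Int),
    fptLoop ls acc t = acc ++ pvTail ls t := by
  induction ls with
  | nil => intro acc t; simp [fptLoop, pvTail]
  | cons l rest ih =>
    intro acc t
    simp only [fptLoop, pvTail]
    split_ifs
    · rfl
    · rw [ih]; simp

theorem cum_findIdx_eq (ls : List String) : ∀ (t : Int),
    (match (pvCum ls t).findIdx? (fun c => decide (c > 50000)) with
      | none => ls
      | some cut => ls.take cut ++ [pvMsg]) = pvTail ls t := by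
  induction ls with
  | nil => intro t; simp [pvCum, pvTail]
  | cons l rest ih =>
    intro t
    simp only [pvCum, pvTail, List.findIdx?_cons, decide_eq_true_eq]
    split_ifs
    · simp
    · rw [← ih (t + (PySem.Str.len l + 1))]
      cases (pvCum rest (t + (PySem.Str.len l + 1))).findIdx? (fun c => decide (c > 50000)) <;>
        simp

-- ===== VERDICT (by name: the statement is the Claim_ definition above) =====
theorem format_plan_text_spec : Claim_equal_format_plan_text := by
  intro s _
  unfold Spec_format_plan_text format_plan_text format_plan_text_alt
  by_cases h : PySem.Str.len s > 50000
  · rw [if_pos h, if_neg (by omega)]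
    rw [fptLoop_eq, ← cum_findIdx_eq (PySem.Str.splitlines s) 0]
    cases hF : (pvCum (PySem.Str.splitlines s) 0).findIdx? (fun c => decide (c > 50000)) <;> simp [hF]
  · rw [if_neg h, if_pos (by omega)]
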